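-- pv_equiv track=rewrite | github.com/mmmmcheeseburger/pre-cal_calculator | expense_tracker_pro.py | _ternary_fix
-- ===== SOURCE A (Python) =====
-- def _ternary_fix(segment: str) -> str:
--     """
--     Support:  cond ? a : b
--     Convert to Python: (a if cond else b)
--
--     Notes:
--     - simple transformer, handles nesting by greedy split from leftmost '?'
--     - if you do crazy nesting without parentheses, it can get confusing (normal).
--     """
--     # quick exit
--     if "?" not in segment:
--         return segment
--
--     # We'll parse with a lightweight scan that respects parentheses/brackets and strings.
--     s = segment
--     in_str = False
--     quote = ""
--     escape = False
--     depth = 0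
--
--     qpos = -1
--     cpos = -1
--
--     # find first top-level '?'
--     for i, ch in enumerate(s):
--         if in_str:
--             if escape:
--                 escape = False
--             elif ch == "\\":
--                 escape = True
--             elif ch == quote:
--                 in_str = False
--             continue
--         if ch in {"'", '"'}:
--             in_str = True
--             quote = ch
--             continue
--         if ch in "([": depth += 1
--         elif ch in ")]": depth -= 1
--         elif ch == "?" and depth == 0:
--             qpos = i
--             break
--
--     if qpos == -1:
--         return segment
--
--     # find matching ':' after that, top-level
--     in_str = False
--     quote = ""
--     escape = False
--     depth = 0
--     for i in range(qpos + 1, len(s)):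
--         ch = s[i]
--         if in_str:
--             if escape:
--                 escape = False
--             elif ch == "\\":
--                 escape = True
--             elif ch == quote:
--                 in_str = False
--             continue
--         if ch in {"'", '"'}:
--             in_str = True
--             quote = ch
--             continue
--         if ch in "([": depth += 1
--         elif ch in ")]": depth -= 1
--         elif ch == ":" and depth == 0:
--             cpos = i
--             break
--
--     if cpos == -1:
--         raise ValueError("Ternary needs ':' like: condition ? a : b")
--
--     cond = s[:qpos].strip()
--     a = s[qpos + 1 : cpos].strip()
--     b = s[cpos + 1 :].strip()
--
--     # recurse in case a/b have ternaries too
--     cond = _ternary_fix(cond)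
--     a = _ternary_fix(a)
--     b = _ternary_fix(b)
--
--     return f"({a} if {cond} else {b})"
-- ===== SOURCE B (Python) =====
-- def _ternary_fix(segment: str) -> str:
--     """Tokenize once, then build the nested conditional with a loop.
--
--     One scan collects the positions of ALL top-level '?' / ':' characters
--     (outside string literals and ()/[] brackets).  Each '?' must be followed
--     immediately (in token order) by a ':' -- otherwise some (sub)ternary has
--     no ':' and we raise the same ValueError A does.  The pairs are then folded
--     right-to-left into the nested "(a if cond else b)" string; no recursion
--     and no re-scanning of substrings.
--     """
--     s = segment
--     toks = []  # (index, char) of every top-level '?' or ':'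
--     in_str = False
--     quote = ""
--     escape = False
--     depth = 0
--     for i, ch in enumerate(s):
--         if in_str:
--             if escape:
--                 escape = False
--             elif ch == "\\":
--                 escape = True
--             elif ch == quote:
--                 in_str = False
--             continue
--         if ch in "'\"":
--             in_str = True
--             quote = ch
--             continue
--         if ch in "([":
--             depth += 1
--         elif ch in ")]":
--             depth -= 1
--         elif depth == 0 and ch in "?:":
--             toks.append((i, ch))
--
--     # pair every '?' with the token that follows it, which must be a ':'
--     triples = []  # (start, qpos, cpos): cond is s[start:qpos]
--     start = 0
--     j = 0
--     while j < len(toks):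
--         i, ch = toks[j]
--         if ch == "?":
--             if j + 1 >= len(toks) or toks[j + 1][1] != ":":
--                 raise ValueError("Ternary needs ':' like: condition ? a : b")
--             triples.append((start, i, toks[j + 1][0]))
--             start = toks[j + 1][0] + 1
--             j += 2
--         else:
--             j += 1
--
--     if not triples:
--         return segment
--
--     out = s[start:].strip()
--     for st, q, c in reversed(triples):
--         out = f"({s[q + 1:c].strip()} if {s[st:q].strip()} else {out})"
--     return out
-- ===== Notes on version B (the rewrite author's own statement) =====
-- stated objective: alternative
-- what changed: A recursively re-scans: each level runs two state-machine passes to find the first top-level '?' and ':' and then recurses on the three stripped substrings (re-scanning and re-stripping the tail at every nesting level); B instead tokenizes the whole string once (one pass collecting all top-level '?'/':' positions), pairs each '?' with the token right after it, and assembles the nested '(a if cond else b)' string with a single right-to-left fold over the pairs, with no recursion and no re-scanning.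
import Mathlib
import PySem

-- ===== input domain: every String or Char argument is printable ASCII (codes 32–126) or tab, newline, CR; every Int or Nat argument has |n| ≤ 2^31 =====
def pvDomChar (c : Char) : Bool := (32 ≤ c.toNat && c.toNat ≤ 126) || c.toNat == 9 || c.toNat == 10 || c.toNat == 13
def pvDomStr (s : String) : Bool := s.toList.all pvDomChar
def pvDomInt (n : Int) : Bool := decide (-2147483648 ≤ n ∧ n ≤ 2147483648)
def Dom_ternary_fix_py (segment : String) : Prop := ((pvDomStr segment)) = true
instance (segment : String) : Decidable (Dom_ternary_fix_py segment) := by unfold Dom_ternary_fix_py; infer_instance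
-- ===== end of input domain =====

-- B replaces A's recursion (each level re-scans and re-strips the tail) by a single
-- tokenizing scan of the whole string followed by one pairing pass and one fold that
-- assembles the nested conditional; same output everywhere A returns.

-- ===== PORT A =====
-- A's first loop: find the first top-level '?' (index i counts absolute positions).
def pvFindQ : List Char → Bool → Char → Bool → Int → Nat → Option Nat
  | [], _, _, _, _, _ => none
  | ch :: rest, instr, quote, esc, depth, i =>
    if instr then
      if esc then pvFindQ rest true quote false depth (i+1)
      else if ch = '\\' then pvFindQ rest true quote true depth (i+1)
      else if ch = quote then pvFindQ rest false quote esc depth (i+1)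
      else pvFindQ rest true quote esc depth (i+1)
    else if ch = '\'' ∨ ch = '"' then pvFindQ rest true ch esc depth (i+1)
    else if ch = '(' ∨ ch = '[' then pvFindQ rest instr quote esc (depth+1) (i+1)
    else if ch = ')' ∨ ch = ']' then pvFindQ rest instr quote esc (depth-1) (i+1)
    else if ch = '?' ∧ depth = 0 then some i
    else pvFindQ rest instr quote esc depth (i+1)

-- A's second loop: find the first top-level ':' (runs over s[qpos+1:], i starts at qpos+1).
def pvFindC : List Char → Bool → Char → Bool → Int → Nat → Option Nat
  | [], _, _, _, _, _ => none
  | ch :: rest, instr, quote, esc, depth, i =>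
    if instr then
      if esc then pvFindC rest true quote false depth (i+1)
      else if ch = '\\' then pvFindC rest true quote true depth (i+1)
      else if ch = quote then pvFindC rest false quote esc depth (i+1)
      else pvFindC rest true quote esc depth (i+1)
    else if ch = '\'' ∨ ch = '"' then pvFindC rest true ch esc depth (i+1)
    else if ch = '(' ∨ ch = '[' then pvFindC rest instr quote esc (depth+1) (i+1)
    else if ch = ')' ∨ ch = ']' then pvFindC rest instr quote esc (depth-1) (i+1)
    else if ch = ':' ∧ depth = 0 then some i
    else pvFindC rest instr quote esc depth (i+1)

-- termination helper, cited by port A's decreasing_by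
theorem pvFindQ_bounds : ∀ (l : List Char) instr quote esc depth i j,
    pvFindQ l instr quote esc depth i = some j → i ≤ j ∧ j < i + l.length := by
  intro l
  induction l with
  | nil => intro _ _ _ _ _ _ h; simp [pvFindQ] at h
  | cons ch rest ih =>
    intro instr quote esc depth i j h
    rw [pvFindQ] at h
    split_ifs at h with h1 h2 h3 h4 h5 h6 h7 h8 <;>
      first
      | (obtain ⟨h', h''⟩ := ih _ _ _ _ _ _ h; simp only [List.length_cons]; omega)
      | (injection h with h; simp only [List.length_cons]; omega)

theorem length_strip_le (l : List Char) : (PySem.Chars.strip l).length ≤ l.length := by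
  simp only [PySem.Chars.strip, PySem.Chars.lstrip, PySem.Chars.rstrip, List.length_reverse]
  calc (List.dropWhile PySem.Chars.isspace (List.dropWhile PySem.Chars.isspace l).reverse).length
      ≤ (List.dropWhile PySem.Chars.isspace l).reverse.length := List.length_dropWhile_le _ _
    _ = (List.dropWhile PySem.Chars.isspace l).length := List.length_reverse
    _ ≤ l.length := List.length_dropWhile_le _ _

-- port of A (literal transliteration; slices s[:q], s[q+1:c], s[c+1:] with the Nat indices
-- pvFindQ/pvFindC return are exactly List.take/drop).
-- On the input where Python A raises ValueError (some (sub)ternary has a top-level '?'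
-- with no later top-level ':') the port returns "" ; those inputs are excluded by
-- Pre_ternary_fix_py.
def ternary_fix_py (segment : String) : String :=
  if PySem.Str.isIn "?" segment = false then segment
  else
    let s := segment.toList
    match hq : pvFindQ s false ' ' false 0 0 with
    | none => segment
    | some qpos =>
      match pvFindC (s.drop (qpos+1)) false ' ' false 0 (qpos+1) with
      | none => ""
      | some cpos =>
        let cond := ternary_fix_py (PySem.Str.strip (String.ofList (s.take qpos)))
        let a := ternary_fix_py (PySem.Str.strip (String.ofList ((s.drop (qpos+1)).take (cpos - (qpos+1)))))
        let b := ternary_fix_py (PySem.Str.strip (String.ofList (s.drop (cpos+1))))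
        "(" ++ a ++ " if " ++ cond ++ " else " ++ b ++ ")"
termination_by segment.toList.length
decreasing_by
  all_goals
    obtain ⟨hq1, hq2⟩ := pvFindQ_bounds _ _ _ _ _ _ _ hq
    simp only [PySem.Str.toList_strip, String.toList_ofList]
    refine lt_of_le_of_lt (length_strip_le _) ?_
    simp only [List.length_take, List.length_drop]
    have hs : s.length = segment.toList.length := rfl
    omega

-- ===== PORT B =====
-- Source B's single scan: collect (index, char) of every top-level '?' / ':' .
def pvToks : List Char → Bool → Char → Bool → Int → Nat → List (Nat × Char)
  | [], _, _, _, _, _ => []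
  | ch :: rest, instr, quote, esc, depth, i =>
    if instr then
      if esc then pvToks rest true quote false depth (i+1)
      else if ch = '\\' then pvToks rest true quote true depth (i+1)
      else if ch = quote then pvToks rest false quote esc depth (i+1)
      else pvToks rest true quote esc depth (i+1)
    else if ch = '\'' ∨ ch = '"' then pvToks rest true ch esc depth (i+1)
    else if ch = '(' ∨ ch = '[' then pvToks rest instr quote esc (depth+1) (i+1)
    else if ch = ')' ∨ ch = ']' then pvToks rest instr quote esc (depth-1) (i+1)
    else if depth = 0 ∧ (ch = '?' ∨ ch = ':') then (i, ch) :: pvToks rest instr quote esc depth (i+1)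
    else pvToks rest instr quote esc depth (i+1)

-- Source B's while loop: pair each '?' with the token right after it (which must be ':'),
-- building (start, qpos, cpos) triples; none = the ValueError branch.
def pvPairs : List (Nat × Char) → Nat → Option (List (Nat × Nat × Nat) × Nat)
  | [], start => some ([], start)
  | [(_, ch)], start => if ch = '?' then none else some ([], start)
  | (i, ch) :: (i2, ch2) :: rest2, start =>
    if ch = '?' then
      if ch2 = ':' then (pvPairs rest2 (i2+1)).map (fun r => ((start, i, i2) :: r.1, r.2))
      else none
    else pvPairs ((i2, ch2) :: rest2) start

-- the body of Source B's reversed() loop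
def pvBuild (s : List Char) (t : Nat × Nat × Nat) (out : String) : String :=
  "(" ++ PySem.Str.strip (String.ofList ((s.drop (t.2.1+1)).take (t.2.2 - (t.2.1+1)))) ++ " if "
      ++ PySem.Str.strip (String.ofList ((s.drop t.1).take (t.2.1 - t.1))) ++ " else " ++ out ++ ")"

-- port of B (literal transliteration of Source B: scan, pair, fold; "" stands for Source B's
-- ValueError, outside Pre_ternary_fix_py).
def ternary_fix_py_alt (segment : String) : String :=
  let s := segment.toList
  match pvPairs (pvToks s false ' ' false 0 0) 0 with
  | none => ""
  | some (triples, start) =>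
    match triples with
    | [] => segment
    | _ :: _ => triples.foldr (pvBuild s) (PySem.Str.strip (String.ofList (s.drop start)))

-- ===== PRECONDITION & SPEC =====
-- Pre_ excludes exactly the inputs on which Python A raises ValueError (a (sub)ternary
-- whose top-level '?' has no matching top-level ':'); B raises the identical ValueError
-- there.  pvPreScan is one left-to-right automaton over the input: after each top-level
-- '?' (outside string literals and ()/[] brackets) the next top-level '?'/':' must be a
-- ':', and no top-level '?' may be left unanswered at the end.
def pvPreScan : List Char → Bool → Char → Bool → Int → Bool → Bool
  | [], _, _, _, _, expect => !expect
  | ch :: rest, instr, quote, esc, depth, expect =>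
    if instr then
      if esc then pvPreScan rest true quote false depth expect
      else if ch = '\\' then pvPreScan rest true quote true depth expect
      else if ch = quote then pvPreScan rest false quote esc depth expect
      else pvPreScan rest true quote esc depth expect
    else if ch = '\'' ∨ ch = '"' then pvPreScan rest true ch esc depth expect
    else if ch = '(' ∨ ch = '[' then pvPreScan rest instr quote esc (depth+1) expect
    else if ch = ')' ∨ ch = ']' then pvPreScan rest instr quote esc (depth-1) expect
    else if ch = '?' ∧ depth = 0 then (if expect then false else pvPreScan rest instr quote esc depth true)
    else if ch = ':' ∧ depth = 0 then pvPreScan rest instr quote esc depth false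
    else pvPreScan rest instr quote esc depth expect

def Pre_ternary_fix_py (segment : String) : Prop :=
  pvPreScan segment.toList false ' ' false 0 false = true
instance (segment : String) : Decidable (Pre_ternary_fix_py segment) := by
  unfold Pre_ternary_fix_py; infer_instance
def pvWitness_ternary_fix_py : String := "x ? 1 : 2"
def Spec_ternary_fix_py (segment : String) (out : String) : Prop := out = ternary_fix_py_alt segment
instance (segment : String) (out : String) : Decidable (Spec_ternary_fix_py segment out) := by
  unfold Spec_ternary_fix_py; infer_instance

-- ===== CLAIM (what is proved, stated in full; the proofs are below) =====
def Claim_equal_ternary_fix_py : Prop := ∀ (segment : String), Dom_ternary_fix_py segment → Pre_ternary_fix_py segment → Spec_ternary_fix_py segment (ternary_fix_py segment)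

-- ===== LEMMAS AND PROOFS =====

-- the start index only shifts token positions
theorem toks_shift : ∀ (l : List Char) instr quote esc depth i k,
    pvToks l instr quote esc depth (i+k)
      = (pvToks l instr quote esc depth i).map (fun p => (p.1 + k, p.2)) := by
  intro l
  induction l with
  | nil => intros; rfl
  | cons ch rest ih =>
    intro instr quote esc depth i k
    rw [pvToks]
    conv_rhs => rw [pvToks]
    have e1 : i + k + 1 = (i + 1) + k := by omega
    split_ifs <;>
      simp only [List.map_cons, e1, ih] <;> rfl

theorem toks_bound : ∀ (l : List Char) instr quote esc depth i p,
    p ∈ pvToks l instr quote esc depth i → i ≤ p.1 ∧ p.1 < i + l.length := by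
  intro l
  induction l with
  | nil => intro _ _ _ _ _ p h; simp [pvToks] at h
  | cons ch rest ih =>
    intro instr quote esc depth i p h
    rw [pvToks] at h
    split_ifs at h <;>
      first
      | (obtain ⟨h1, h2⟩ := ih _ _ _ _ _ _ h; simp only [List.length_cons]; omega)
      | (rcases List.mem_cons.mp h with h' | h'
         · subst h'; simp only [List.length_cons]; omega
         · obtain ⟨h1, h2⟩ := ih _ _ _ _ _ _ h'; simp only [List.length_cons]; omega)

theorem toks_chars : ∀ (l : List Char) instr quote esc depth i p,
    p ∈ pvToks l instr quote esc depth i → p.2 = '?' ∨ p.2 = ':' := by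
  intro l
  induction l with
  | nil => intro _ _ _ _ _ p h; simp [pvToks] at h
  | cons ch rest ih =>
    intro instr quote esc depth i p h
    rw [pvToks] at h
    split_ifs at h with h1 h2 h3 h4 h5 h6 h7 h8 <;>
      first
      | exact ih _ _ _ _ _ _ h
      | (rcases List.mem_cons.mp h with h' | h'
         · subst h'; exact h8.2
         · exact ih _ _ _ _ _ _ h')

theorem toks_mem : ∀ (l : List Char) instr quote esc depth i p,
    p ∈ pvToks l instr quote esc depth i → p.2 ∈ l := by
  intro l
  induction l with
  | nil => intro _ _ _ _ _ p h; simp [pvToks] at h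
  | cons ch rest ih =>
    intro instr quote esc depth i p h
    rw [pvToks] at h
    split_ifs at h <;>
      first
      | exact List.mem_cons_of_mem _ (ih _ _ _ _ _ _ h)
      | (rcases List.mem_cons.mp h with h' | h'
         · subst h'; exact List.mem_cons_self
         · exact List.mem_cons_of_mem _ (ih _ _ _ _ _ _ h'))

theorem toks_sorted : ∀ (l : List Char) instr quote esc depth i,
    (pvToks l instr quote esc depth i).Pairwise (fun p q => p.1 < q.1) := by
  intro l
  induction l with
  | nil => intros; simp [pvToks]
  | cons ch rest ih =>
    intro instr quote esc depth i
    rw [pvToks]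
    split_ifs <;>
      first
      | exact ih _ _ _ _ _
      | (refine List.Pairwise.cons ?_ (ih _ _ _ _ _)
         intro p hp
         have := (toks_bound _ _ _ _ _ _ _ hp).1
         simp only []
         omega)

theorem toks_quote_irrel : ∀ (l : List Char) (q1 q2 : Char) esc depth i,
    pvToks l false q1 esc depth i = pvToks l false q2 esc depth i := by
  intro l
  induction l with
  | nil => intros; rfl
  | cons ch rest ih =>
    intro q1 q2 esc depth i
    rw [pvToks]
    conv_rhs => rw [pvToks]
    simp only [Bool.false_eq_true, if_false]
    split_ifs <;> first | rfl | exact ih _ _ _ _ _ | exact congrArg _ (ih _ _ _ _ _)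

-- a list without '?' or ':' produces no tokens (from any state)
theorem toks_no_qc : ∀ (l : List Char) instr quote esc depth i,
    (∀ c ∈ l, ¬(c = '?' ∨ c = ':')) → pvToks l instr quote esc depth i = [] := by
  intro l
  induction l with
  | nil => intros; rfl
  | cons ch rest ih =>
    intro instr quote esc depth i hno
    rw [pvToks]
    have hch := hno ch List.mem_cons_self
    have hrest : ∀ c ∈ rest, ¬(c = '?' ∨ c = ':') := fun c hc => hno c (List.mem_cons_of_mem _ hc)
    split_ifs with h1 h2 h3 h4 h5 h6 h7 h8 <;>
      first
      | exact ih _ _ _ _ _ hrest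
      | exact absurd h8.2 hch

theorem toks_append_no_qc : ∀ (l w : List Char) instr quote esc depth i,
    (∀ c ∈ w, ¬(c = '?' ∨ c = ':')) →
    pvToks (l ++ w) instr quote esc depth i = pvToks l instr quote esc depth i := by
  intro l
  induction l with
  | nil =>
    intro w instr quote esc depth i hw
    simp only [List.nil_append]
    rw [toks_no_qc _ _ _ _ _ _ hw]
    rfl
  | cons ch rest ih =>
    intro w instr quote esc depth i hw
    simp only [List.cons_append]
    rw [pvToks]
    conv_rhs => rw [pvToks]
    split_ifs <;> first | exact ih _ _ _ _ _ _ hw | exact congrArg _ (ih _ _ _ _ _ _ hw)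

-- generic version of A's two scan loops (t is the searched top-level character)
def pvFindT (t : Char) : List Char → Bool → Char → Bool → Int → Nat → Option Nat
  | [], _, _, _, _, _ => none
  | ch :: rest, instr, quote, esc, depth, i =>
    if instr then
      if esc then pvFindT t rest true quote false depth (i+1)
      else if ch = '\\' then pvFindT t rest true quote true depth (i+1)
      else if ch = quote then pvFindT t rest false quote esc depth (i+1)
      else pvFindT t rest true quote esc depth (i+1)
    else if ch = '\'' ∨ ch = '"' then pvFindT t rest true ch esc depth (i+1)
    else if ch = '(' ∨ ch = '[' then pvFindT t rest instr quote esc (depth+1) (i+1)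
    else if ch = ')' ∨ ch = ']' then pvFindT t rest instr quote esc (depth-1) (i+1)
    else if ch = t ∧ depth = 0 then some i
    else pvFindT t rest instr quote esc depth (i+1)

theorem findQ_eq : ∀ (l : List Char) instr quote esc depth i,
    pvFindQ l instr quote esc depth i = pvFindT '?' l instr quote esc depth i := by
  intro l
  induction l with
  | nil => intros; rfl
  | cons ch rest ih =>
    intro instr quote esc depth i
    rw [pvFindQ, pvFindT]
    split_ifs <;> first | rfl | exact ih _ _ _ _ _

theorem findC_eq : ∀ (l : List Char) instr quote esc depth i,
    pvFindC l instr quote esc depth i = pvFindT ':' l instr quote esc depth i := by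
  intro l
  induction l with
  | nil => intros; rfl
  | cons ch rest ih =>
    intro instr quote esc depth i
    rw [pvFindC, pvFindT]
    split_ifs <;> first | rfl | exact ih _ _ _ _ _

theorem pvFindT_bounds : ∀ (t : Char) (l : List Char) instr quote esc depth i j,
    pvFindT t l instr quote esc depth i = some j → i ≤ j ∧ j < i + l.length := by
  intro t l
  induction l with
  | nil => intro _ _ _ _ _ _ h; simp [pvFindT] at h
  | cons ch rest ih =>
    intro instr quote esc depth i j h
    rw [pvFindT] at h
    split_ifs at h <;>
      first
      | (obtain ⟨h', h''⟩ := ih _ _ _ _ _ _ h; simp only [List.length_cons]; omega)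
      | (injection h with h; simp only [List.length_cons]; omega)

-- pvFindT is "first t-token" of the tokenizer
theorem tokT : ∀ (t : Char), (t = '?' ∨ t = ':') → ∀ (l : List Char) instr quote esc depth i,
    pvFindT t l instr quote esc depth i
      = ((pvToks l instr quote esc depth i).find? (fun p => p.2 == t)).map Prod.fst := by
  intro t ht l
  induction l with
  | nil => intros; rfl
  | cons ch rest ih =>
    intro instr quote esc depth i
    rw [pvFindT, pvToks]
    split_ifs with h1 h2 h3 h4 h5 h6 h7 h8 h9 <;>
      first
      | exact ih _ _ _ _ _
      | (simp only [List.find?_cons, show (((i, ch).2 == t) = true) by simp_all]; rfl)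
      | (simp only [List.find?_cons, show (((i, ch).2 == t) = false) by simp_all]; exact ih _ _ _ _ _)
      | (exact absurd ⟨h8.2, by rcases ht with h | h <;> subst h <;> [exact Or.inl h8.1; exact Or.inr h8.1]⟩ h9)
      | tauto

-- the split lemma: the fresh re-scan after the first found t-token yields exactly the
-- remaining tokens, and no earlier token is a t
theorem splitT : ∀ (t : Char), (t = '?' ∨ t = ':') → ∀ (l : List Char) instr quote esc depth i q,
    (instr = false → esc = false) →
    pvFindT t l instr quote esc depth i = some q →
    pvToks l instr quote esc depth i
      = pvToks (l.take (q-i)) instr quote esc depth i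
        ++ (q, t) :: pvToks (l.drop (q+1-i)) false ' ' false 0 (q+1)
    ∧ ∀ p ∈ pvToks (l.take (q-i)) instr quote esc depth i, p.2 ≠ t := by
  intro t ht l
  induction l with
  | nil => intro _ _ _ _ _ _ _ h; simp [pvFindT] at h
  | cons ch rest ih =>
    intro instr quote esc depth i q hesc hfind
    rw [pvFindT] at hfind
    split_ifs at hfind with h1 h2 h3 h4 h5 h6 h7 h8
    · -- in string, escaped
      obtain ⟨hb1, hb2⟩ := pvFindT_bounds _ _ _ _ _ _ _ _ hfind
      have e1 : q - i = (q - (i+1)) + 1 := by omega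
      have e2 : q + 1 - i = (q + 1 - (i+1)) + 1 := by omega
      have hstep : ∀ l', pvToks (ch::l') instr quote esc depth i
          = pvToks l' true quote false depth (i+1) := by
        intro l'; rw [pvToks, if_pos h1, if_pos h2]
      rw [e1, List.take_succ_cons, e2, List.drop_succ_cons]
      simp only [hstep]
      exact ih _ _ _ _ _ _ (fun h => by simp at h) hfind
    · obtain ⟨hb1, hb2⟩ := pvFindT_bounds _ _ _ _ _ _ _ _ hfind
      have e1 : q - i = (q - (i+1)) + 1 := by omega
      have e2 : q + 1 - i = (q + 1 - (i+1)) + 1 := by omega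
      have hstep : ∀ l', pvToks (ch::l') instr quote esc depth i
          = pvToks l' true quote true depth (i+1) := by
        intro l'; rw [pvToks, if_pos h1, if_neg h2, if_pos h3]
      rw [e1, List.take_succ_cons, e2, List.drop_succ_cons]
      simp only [hstep]
      exact ih _ _ _ _ _ _ (fun h => by simp at h) hfind
    · obtain ⟨hb1, hb2⟩ := pvFindT_bounds _ _ _ _ _ _ _ _ hfind
      have e1 : q - i = (q - (i+1)) + 1 := by omega
      have e2 : q + 1 - i = (q + 1 - (i+1)) + 1 := by omega
      have hstep : ∀ l', pvToks (ch::l') instr quote esc depth i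
          = pvToks l' false quote esc depth (i+1) := by
        intro l'; rw [pvToks, if_pos h1, if_neg h2, if_neg h3, if_pos h4]
      rw [e1, List.take_succ_cons, e2, List.drop_succ_cons]
      simp only [hstep]
      exact ih _ _ _ _ _ _ (fun _ => by revert h2; cases esc <;> simp) hfind
    · obtain ⟨hb1, hb2⟩ := pvFindT_bounds _ _ _ _ _ _ _ _ hfind
      have e1 : q - i = (q - (i+1)) + 1 := by omega
      have e2 : q + 1 - i = (q + 1 - (i+1)) + 1 := by omega
      have hstep : ∀ l', pvToks (ch::l') instr quote esc depth i
          = pvToks l' true quote esc depth (i+1) := by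
        intro l'; rw [pvToks, if_pos h1, if_neg h2, if_neg h3, if_neg h4]
      rw [e1, List.take_succ_cons, e2, List.drop_succ_cons]
      simp only [hstep]
      exact ih _ _ _ _ _ _ (fun h => by simp at h) hfind
    · -- opening quote
      obtain ⟨hb1, hb2⟩ := pvFindT_bounds _ _ _ _ _ _ _ _ hfind
      have e1 : q - i = (q - (i+1)) + 1 := by omega
      have e2 : q + 1 - i = (q + 1 - (i+1)) + 1 := by omega
      have hstep : ∀ l', pvToks (ch::l') instr quote esc depth i
          = pvToks l' true ch esc depth (i+1) := by
        intro l'; rw [pvToks, if_neg h1, if_pos h5]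
      rw [e1, List.take_succ_cons, e2, List.drop_succ_cons]
      simp only [hstep]
      exact ih _ _ _ _ _ _ (fun h => by simp at h) hfind
    · -- opening bracket
      obtain ⟨hb1, hb2⟩ := pvFindT_bounds _ _ _ _ _ _ _ _ hfind
      have e1 : q - i = (q - (i+1)) + 1 := by omega
      have e2 : q + 1 - i = (q + 1 - (i+1)) + 1 := by omega
      have hstep : ∀ l', pvToks (ch::l') instr quote esc depth i
          = pvToks l' instr quote esc (depth+1) (i+1) := by
        intro l'; rw [pvToks, if_neg h1, if_neg h5, if_pos h6]
      rw [e1, List.take_succ_cons, e2, List.drop_succ_cons]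
      simp only [hstep]
      exact ih _ _ _ _ _ _ hesc hfind
    · -- closing bracket
      obtain ⟨hb1, hb2⟩ := pvFindT_bounds _ _ _ _ _ _ _ _ hfind
      have e1 : q - i = (q - (i+1)) + 1 := by omega
      have e2 : q + 1 - i = (q + 1 - (i+1)) + 1 := by omega
      have hstep : ∀ l', pvToks (ch::l') instr quote esc depth i
          = pvToks l' instr quote esc (depth-1) (i+1) := by
        intro l'; rw [pvToks, if_neg h1, if_neg h5, if_neg h6, if_pos h7]
      rw [e1, List.take_succ_cons, e2, List.drop_succ_cons]
      simp only [hstep]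
      exact ih _ _ _ _ _ _ hesc hfind
    · -- the t-token is found here: q = i
      injection hfind with hq
      subst hq
      have hinstr : instr = false := by revert h1; cases instr <;> simp
      have hesc' : esc = false := hesc hinstr
      have hE : depth = 0 ∧ (ch = '?' ∨ ch = ':') := ⟨h8.2, by rcases ht with h | h <;> subst h <;> [exact Or.inl h8.1; exact Or.inr h8.1]⟩
      have hstep : pvToks (ch::rest) instr quote esc depth i
          = (i, ch) :: pvToks rest instr quote esc depth (i+1) := by
        rw [pvToks, if_neg h1, if_neg h5, if_neg h6, if_neg h7, if_pos hE]
      constructor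
      · simp only [Nat.sub_self, List.take_zero, Nat.add_sub_cancel_left, List.drop_succ_cons,
          List.drop_zero, List.nil_append]
        rw [hstep, hinstr, hesc', h8.1, h8.2]
        rw [toks_quote_irrel rest quote ' ' false 0 (i+1)]
        simp [pvToks]
      · simp [pvToks]
    · -- ordinary character (possibly the other token kind)
      obtain ⟨hb1, hb2⟩ := pvFindT_bounds _ _ _ _ _ _ _ _ hfind
      have e1 : q - i = (q - (i+1)) + 1 := by omega
      have e2 : q + 1 - i = (q + 1 - (i+1)) + 1 := by omega
      rw [e1, List.take_succ_cons, e2, List.drop_succ_cons]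
      by_cases hE : depth = 0 ∧ (ch = '?' ∨ ch = ':')
      · have hch : ch ≠ t := fun hc => h8 ⟨hc, hE.1⟩
        have hstep : ∀ l', pvToks (ch::l') instr quote esc depth i
            = (i, ch) :: pvToks l' instr quote esc depth (i+1) := by
          intro l'; rw [pvToks, if_neg h1, if_neg h5, if_neg h6, if_neg h7, if_pos hE]
        obtain ⟨ihEq, ihP⟩ := ih _ _ _ _ _ _ hesc hfind
        simp only [hstep]
        constructor
        · rw [List.cons_append, ihEq]
        · intro p hp
          rcases List.mem_cons.mp hp with h' | h'
          · subst h'; exact hch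
          · exact ihP p h'
      · have hstep : ∀ l', pvToks (ch::l') instr quote esc depth i
            = pvToks l' instr quote esc depth (i+1) := by
          intro l'; rw [pvToks, if_neg h1, if_neg h5, if_neg h6, if_neg h7, if_neg hE]
        simp only [hstep]
        exact ih _ _ _ _ _ _ hesc hfind

theorem tokQ : ∀ (l : List Char) instr quote esc depth i,
    pvFindQ l instr quote esc depth i
      = ((pvToks l instr quote esc depth i).find? (fun p => p.2 == '?')).map Prod.fst := by
  intro l instr quote esc depth i
  rw [findQ_eq, tokT '?' (Or.inl rfl)]

theorem tokC : ∀ (l : List Char) instr quote esc depth i,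
    pvFindC l instr quote esc depth i
      = ((pvToks l instr quote esc depth i).find? (fun p => p.2 == ':')).map Prod.fst := by
  intro l instr quote esc depth i
  rw [findC_eq, tokT ':' (Or.inr rfl)]

theorem splitQ : ∀ (l : List Char) instr quote esc depth i q,
    (instr = false → esc = false) →
    pvFindQ l instr quote esc depth i = some q →
    pvToks l instr quote esc depth i
      = pvToks (l.take (q-i)) instr quote esc depth i
        ++ (q, '?') :: pvToks (l.drop (q+1-i)) false ' ' false 0 (q+1)
    ∧ ∀ p ∈ pvToks (l.take (q-i)) instr quote esc depth i, p.2 ≠ '?' := by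
  intro l instr quote esc depth i q hesc hfind
  exact splitT '?' (Or.inl rfl) l instr quote esc depth i q hesc (by rw [← findQ_eq]; exact hfind)

theorem splitC : ∀ (l : List Char) instr quote esc depth i c,
    (instr = false → esc = false) →
    pvFindC l instr quote esc depth i = some c →
    pvToks l instr quote esc depth i
      = pvToks (l.take (c-i)) instr quote esc depth i
        ++ (c, ':') :: pvToks (l.drop (c+1-i)) false ' ' false 0 (c+1)
    ∧ ∀ p ∈ pvToks (l.take (c-i)) instr quote esc depth i, p.2 ≠ ':' := by
  intro l instr quote esc depth i c hesc hfind
  exact splitT ':' (Or.inr rfl) l instr quote esc depth i c hesc (by rw [← findC_eq]; exact hfind)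

-- the Pre_ automaton seen on the token characters
def pvPairOK : List Char → Bool → Bool
  | [], e => !e
  | c :: r, e =>
    if c = '?' then (if e then false else pvPairOK r true)
    else if c = ':' then pvPairOK r false
    else pvPairOK r e

theorem preToks : ∀ (l : List Char) instr quote esc depth i expect,
    pvPreScan l instr quote esc depth expect
      = pvPairOK ((pvToks l instr quote esc depth i).map Prod.snd) expect := by
  intro l
  induction l with
  | nil => intros; rfl
  | cons ch rest ih =>
    intro instr quote esc depth i expect
    by_cases h1 : instr = true
    · by_cases h2 : esc = true
      · rw [pvPreScan, if_pos h1, if_pos h2, pvToks, if_pos h1, if_pos h2]; exact ih _ _ _ _ _ _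
      · by_cases h3 : ch = '\\'
        · rw [pvPreScan, if_pos h1, if_neg h2, if_pos h3, pvToks, if_pos h1, if_neg h2, if_pos h3]
          exact ih _ _ _ _ _ _
        · by_cases h4 : ch = quote
          · rw [pvPreScan, if_pos h1, if_neg h2, if_neg h3, if_pos h4,
                pvToks, if_pos h1, if_neg h2, if_neg h3, if_pos h4]
            exact ih _ _ _ _ _ _
          · rw [pvPreScan, if_pos h1, if_neg h2, if_neg h3, if_neg h4,
                pvToks, if_pos h1, if_neg h2, if_neg h3, if_neg h4]
            exact ih _ _ _ _ _ _
    · by_cases h5 : ch = '\'' ∨ ch = '"'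
      · rw [pvPreScan, if_neg h1, if_pos h5, pvToks, if_neg h1, if_pos h5]; exact ih _ _ _ _ _ _
      · by_cases h6 : ch = '(' ∨ ch = '['
        · rw [pvPreScan, if_neg h1, if_neg h5, if_pos h6, pvToks, if_neg h1, if_neg h5, if_pos h6]
          exact ih _ _ _ _ _ _
        · by_cases h7 : ch = ')' ∨ ch = ']'
          · rw [pvPreScan, if_neg h1, if_neg h5, if_neg h6, if_pos h7,
                pvToks, if_neg h1, if_neg h5, if_neg h6, if_pos h7]
            exact ih _ _ _ _ _ _
          · by_cases h8 : ch = '?' ∧ depth = 0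
            · have hE : depth = 0 ∧ (ch = '?' ∨ ch = ':') := ⟨h8.2, Or.inl h8.1⟩
              rw [pvPreScan, if_neg h1, if_neg h5, if_neg h6, if_neg h7, if_pos h8,
                  pvToks, if_neg h1, if_neg h5, if_neg h6, if_neg h7, if_pos hE]
              simp only [List.map_cons, pvPairOK, if_pos h8.1]
              by_cases hx : expect = true
              · rw [if_pos hx, if_pos hx]
              · rw [if_neg hx, if_neg hx]; exact ih _ _ _ _ _ _
            · by_cases h9 : ch = ':' ∧ depth = 0
              · have hE : depth = 0 ∧ (ch = '?' ∨ ch = ':') := ⟨h9.2, Or.inr h9.1⟩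
                rw [pvPreScan, if_neg h1, if_neg h5, if_neg h6, if_neg h7, if_neg h8, if_pos h9,
                    pvToks, if_neg h1, if_neg h5, if_neg h6, if_neg h7, if_pos hE]
                simp only [List.map_cons, pvPairOK, h9.1]
                rw [if_pos True.intro]
                exact ih _ _ _ _ _ _
              · have hE : ¬(depth = 0 ∧ (ch = '?' ∨ ch = ':')) := by
                  rintro ⟨hd, hor | hor⟩
                  · exact h8 ⟨hor, hd⟩
                  · exact h9 ⟨hor, hd⟩
                rw [pvPreScan, if_neg h1, if_neg h5, if_neg h6, if_neg h7, if_neg h8, if_neg h9,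
                    pvToks, if_neg h1, if_neg h5, if_neg h6, if_neg h7, if_neg hE]
                exact ih _ _ _ _ _ _

theorem pvPairs_nil (start : Nat) : pvPairs [] start = some ([], start) := by
  rw [pvPairs.eq_def]

theorem pvPairs_one (i : Nat) (ch : Char) (start : Nat) :
    pvPairs [(i, ch)] start = if ch = '?' then none else some ([], start) := by
  rw [pvPairs.eq_def]

theorem pvPairs_cons2 (i : Nat) (ch : Char) (i2 : Nat) (ch2 : Char)
    (rest2 : List (Nat × Char)) (start : Nat) :
    pvPairs ((i, ch) :: (i2, ch2) :: rest2) start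
      = if ch = '?' then
          if ch2 = ':' then (pvPairs rest2 (i2+1)).map (fun r => ((start, i, i2) :: r.1, r.2))
          else none
        else pvPairs ((i2, ch2) :: rest2) start := by
  rw [pvPairs.eq_def]

theorem pvPairs_skip_colon (i : Nat) (xs : List (Nat × Char)) (start : Nat) :
    pvPairs ((i, ':') :: xs) start = pvPairs xs start := by
  match xs with
  | [] =>
    rw [pvPairs_one, if_neg (by decide : ¬(':' : Char) = '?'), pvPairs_nil]
  | (i2, ch2) :: rest2 =>
    rw [pvPairs_cons2, if_neg (by decide : ¬(':' : Char) = '?')]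

theorem pairOK_colons : ∀ (cs r : List Char), (∀ c ∈ cs, c = ':') →
    pvPairOK (cs ++ r) false = pvPairOK r false := by
  intro cs
  induction cs with
  | nil => intros; rfl
  | cons c cs' ih =>
    intro r hc
    have h1 : c = ':' := hc c List.mem_cons_self
    subst h1
    rw [List.cons_append, pvPairOK]
    rw [if_neg (by decide : ¬(':' : Char) = '?'), if_pos rfl]
    exact ih r (fun c hc' => hc c (List.mem_cons_of_mem _ hc'))

theorem pvPairs_skip : ∀ (P rest : List (Nat × Char)) start, (∀ p ∈ P, p.2 = ':') →
    pvPairs (P ++ rest) start = pvPairs rest start := by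
  intro P
  induction P with
  | nil => intros; rfl
  | cons p P' ih =>
    intro rest start hP
    obtain ⟨i, ch⟩ := p
    have h1 : ch = ':' := hP (i, ch) List.mem_cons_self
    subst h1
    rw [List.cons_append, pvPairs_skip_colon]
    exact ih rest start (fun p hp => hP p (List.mem_cons_of_mem _ hp))

theorem pvPairs_total : ∀ (toks : List (Nat × Char)) start,
    (∀ p ∈ toks, p.2 = '?' ∨ p.2 = ':') →
    pvPairOK (toks.map Prod.snd) false = true →
    ∃ T st, pvPairs toks start = some (T, st) := by
  suffices H : ∀ (n : Nat) (toks : List (Nat × Char)) start, toks.length ≤ n →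
      (∀ p ∈ toks, p.2 = '?' ∨ p.2 = ':') →
      pvPairOK (toks.map Prod.snd) false = true →
      ∃ T st, pvPairs toks start = some (T, st) by
    intro toks start hch hok
    exact H toks.length toks start le_rfl hch hok
  intro n
  induction n with
  | zero =>
    intro toks start hlen _ _
    have h0 : toks = [] := List.eq_nil_of_length_eq_zero (Nat.le_zero.mp hlen)
    subst h0
    exact ⟨[], start, pvPairs_nil start⟩
  | succ n ihn =>
    intro toks start hlen hch hok
    match toks with
    | [] => exact ⟨[], start, pvPairs_nil start⟩
    | [(i, ch)] =>
      have hc : ch = ':' := by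
        rcases hch (i, ch) List.mem_cons_self with h | h
        · exfalso; have h' : ch = '?' := h; subst h'; simp [pvPairOK] at hok
        · exact h
      subst hc
      exact ⟨[], start, by rw [pvPairs_one, if_neg (by decide : ¬(':' : Char) = '?')]⟩
    | (i, ch) :: (i2, ch2) :: rest2 =>
      by_cases hq : ch = '?'
      · subst hq
        have h2 : ch2 = ':' := by
          rcases hch (i2, ch2) (List.mem_cons_of_mem _ List.mem_cons_self) with h | h
          · exfalso; have h' : ch2 = '?' := h; subst h'; simp [pvPairOK] at hok
          · exact h
        subst h2
        have hok2 : pvPairOK (rest2.map Prod.snd) false = true := by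
          simp only [List.map_cons, pvPairOK] at hok
          simpa using hok
        obtain ⟨T, st, hT⟩ := ihn rest2 (i2+1)
          (by simp only [List.length_cons] at hlen ⊢; omega)
          (fun p hp => hch p (List.mem_cons_of_mem _ (List.mem_cons_of_mem _ hp))) hok2
        refine ⟨(start, i, i2) :: T, st, ?_⟩
        rw [pvPairs_cons2, if_pos rfl, if_pos rfl, hT]
        rfl
      · have hc : ch = ':' := (hch (i, ch) List.mem_cons_self).resolve_left hq
        subst hc
        have hok2 : pvPairOK (((i2, ch2) :: rest2).map Prod.snd) false = true := by
          simp only [List.map_cons, pvPairOK] at hok ⊢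
          simpa using hok
        obtain ⟨T, st, hT⟩ := ihn ((i2, ch2) :: rest2) start
          (by simp only [List.length_cons] at hlen ⊢; omega)
          (fun p hp => hch p (List.mem_cons_of_mem _ hp)) hok2
        exact ⟨T, st, by rw [pvPairs_skip_colon]; exact hT⟩

theorem pvPairs_empty_start : ∀ (toks : List (Nat × Char)) start st,
    pvPairs toks start = some ([], st) → st = start := by
  intro toks
  induction toks with
  | nil =>
    intro start st h
    rw [pvPairs_nil] at h
    simp only [Option.some.injEq, Prod.mk.injEq] at h
    exact h.2.symm
  | cons p rest ih =>
    intro start st h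
    obtain ⟨i, ch⟩ := p
    match rest with
    | [] =>
      rw [pvPairs_one] at h
      split_ifs at h
      simp only [Option.some.injEq, Prod.mk.injEq] at h
      exact h.2.symm
    | (i2, ch2) :: rest2 =>
      rw [pvPairs_cons2] at h
      split_ifs at h
      · rcases hT : pvPairs rest2 (i2+1) with _ | ⟨T, st'⟩ <;> rw [hT] at h <;> simp at h
      · exact ih start st h

theorem pvPairs_head_start : ∀ (toks : List (Nat × Char)) start t R st,
    pvPairs toks start = some (t :: R, st) → t.1 = start := by
  intro toks
  induction toks with
  | nil => intro start t R st h; rw [pvPairs_nil] at h; simp at h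
  | cons p rest ih =>
    intro start t R st h
    obtain ⟨i, ch⟩ := p
    match rest with
    | [] =>
      rw [pvPairs_one] at h
      split_ifs at h <;> simp at h
    | (i2, ch2) :: rest2 =>
      rw [pvPairs_cons2] at h
      split_ifs at h
      · rcases hT : pvPairs rest2 (i2+1) with _ | ⟨T, st'⟩ <;> rw [hT] at h <;> simp at h
        rw [← h.1.1]
      · exact ih start t R st h

-- shifting all token positions by d shifts the triples and the final start by d
theorem pvPairs_shift : ∀ (toks : List (Nat × Char)) start d,
    pvPairs (toks.map (fun p => (p.1 + d, p.2))) (start + d)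
      = (pvPairs toks start).map
          (fun r => (r.1.map (fun t => (t.1 + d, t.2.1 + d, t.2.2 + d)), r.2 + d)) := by
  suffices H : ∀ (n : Nat) (toks : List (Nat × Char)) start d, toks.length ≤ n →
      pvPairs (toks.map (fun p => (p.1 + d, p.2))) (start + d)
        = (pvPairs toks start).map
            (fun r => (r.1.map (fun t => (t.1 + d, t.2.1 + d, t.2.2 + d)), r.2 + d)) by
    intro toks start d
    exact H toks.length toks start d le_rfl
  intro n
  induction n with
  | zero =>
    intro toks start d hlen
    have h0 : toks = [] := List.eq_nil_of_length_eq_zero (Nat.le_zero.mp hlen)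
    subst h0
    simp only [List.map_nil, pvPairs_nil, Option.map_some]
  | succ n ihn =>
    intro toks start d hlen
    match toks with
    | [] => simp only [List.map_nil, pvPairs_nil, Option.map_some]
    | [(i, ch)] =>
      simp only [List.map_cons, List.map_nil, pvPairs_one]
      split_ifs <;> rfl
    | (i, ch) :: (i2, ch2) :: rest2 =>
      simp only [List.map_cons]
      rw [pvPairs_cons2]
      conv_rhs => rw [pvPairs_cons2]
      split_ifs with hq hc
      · have e1 : i2 + d + 1 = (i2 + 1) + d := by omega
        rw [e1, ihn rest2 (i2+1) d (by simp only [List.length_cons] at hlen ⊢; omega)]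
        rcases hT : pvPairs rest2 (i2+1) with _ | ⟨T, st⟩ <;> simp
      · rfl
      · have hrec := ihn ((i2, ch2) :: rest2) start d
          (by simp only [List.length_cons] at hlen ⊢; omega)
        simp only [List.map_cons] at hrec
        exact hrec

-- the initial start only lands in the first triple (or the final start when no pair exists)
theorem pvPairs_start : ∀ (toks : List (Nat × Char)) s1 s2,
    pvPairs toks s1
      = (pvPairs toks s2).map
          (fun r => (match r.1 with | [] => [] | t :: R => (s1, t.2) :: R,
                     match r.1 with | [] => s1 | _ :: _ => r.2)) := by
  intro toks
  induction toks with
  | nil => intro s1 s2; simp only [pvPairs_nil, Option.map_some]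
  | cons p rest ih =>
    intro s1 s2
    obtain ⟨i, ch⟩ := p
    match rest with
    | [] =>
      rw [pvPairs_one]
      conv_rhs => rw [pvPairs_one]
      split_ifs <;> rfl
    | (i2, ch2) :: rest2 =>
      rw [pvPairs_cons2]
      conv_rhs => rw [pvPairs_cons2]
      split_ifs with hq hc
      · rcases hT : pvPairs rest2 (i2+1) with _ | ⟨T, st⟩ <;> simp
      · rfl
      · exact ih s1 s2

-- coordinate bounds of the produced triples
theorem pvPairs_bounds : ∀ (toks : List (Nat × Char)) s0 T e N,
    List.Pairwise (fun p q => p.1 < q.1) toks →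
    (∀ p ∈ toks, p.1 < N) → s0 ≤ N → (∀ p ∈ toks, s0 ≤ p.1) →
    pvPairs toks s0 = some (T, e) →
    (∀ t ∈ T, t.1 ≤ t.2.1 ∧ t.2.1 + 1 ≤ t.2.2 ∧ t.2.2 < N) ∧ e ≤ N := by
  suffices H : ∀ (n : Nat) (toks : List (Nat × Char)) s0 T e N, toks.length ≤ n →
      List.Pairwise (fun p q => p.1 < q.1) toks →
      (∀ p ∈ toks, p.1 < N) → s0 ≤ N → (∀ p ∈ toks, s0 ≤ p.1) →
      pvPairs toks s0 = some (T, e) →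
      (∀ t ∈ T, t.1 ≤ t.2.1 ∧ t.2.1 + 1 ≤ t.2.2 ∧ t.2.2 < N) ∧ e ≤ N by
    intro toks s0 T e N hpw hN hs0 hall h
    exact H toks.length toks s0 T e N le_rfl hpw hN hs0 hall h
  intro n
  induction n with
  | zero =>
    intro toks s0 T e N hlen _ _ hs0 _ h
    have h0 : toks = [] := List.eq_nil_of_length_eq_zero (Nat.le_zero.mp hlen)
    subst h0
    rw [pvPairs_nil] at h
    simp only [Option.some.injEq, Prod.mk.injEq] at h
    exact ⟨by rw [← h.1]; intro t ht; simp at ht, by omega⟩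
  | succ n ihn =>
    intro toks s0 T e N hlen hpw hN hs0 hall h
    match toks with
    | [] =>
      rw [pvPairs_nil] at h
      simp only [Option.some.injEq, Prod.mk.injEq] at h
      exact ⟨by rw [← h.1]; intro t ht; simp at ht, by rw [← h.2]; exact hs0⟩
    | [(i, ch)] =>
      rw [pvPairs_one] at h
      split_ifs at h
      simp only [Option.some.injEq, Prod.mk.injEq] at h
      exact ⟨by rw [← h.1]; intro t ht; simp at ht, by rw [← h.2]; exact hs0⟩
    | (i, ch) :: (i2, ch2) :: rest2 =>
      rw [pvPairs_cons2] at h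
      split_ifs at h
      · rcases hT : pvPairs rest2 (i2+1) with _ | ⟨T', st'⟩ <;> rw [hT] at h
        · exact absurd h (by simp)
        · simp only [Option.map_some, Option.some.injEq, Prod.mk.injEq] at h
          have hi2 : i < i2 := (List.pairwise_cons.mp hpw).1 (i2, ch2) List.mem_cons_self
          have hi2N : i2 < N := hN (i2, ch2) (List.mem_cons_of_mem _ List.mem_cons_self)
          have hpw2 : List.Pairwise (fun p q => p.1 < q.1) rest2 :=
            ((List.pairwise_cons.mp (List.pairwise_cons.mp hpw).2).2)
          have hgt : ∀ p ∈ rest2, i2 + 1 ≤ p.1 := by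
            intro p hp
            have := (List.pairwise_cons.mp (List.pairwise_cons.mp hpw).2).1 p hp
            omega
          obtain ⟨hT'b, hst'⟩ := ihn rest2 (i2+1) T' st' N
            (by simp only [List.length_cons] at hlen ⊢; omega) hpw2
            (fun p hp => hN p (List.mem_cons_of_mem _ (List.mem_cons_of_mem _ hp)))
            (by omega) hgt hT
          constructor
          · rw [← h.1]
            intro t ht
            rcases List.mem_cons.mp ht with h' | h'
            · subst h'
              refine ⟨hall (i, ch) List.mem_cons_self, Nat.succ_le_of_lt hi2, hi2N⟩
            · exact hT'b t h'
          · rw [← h.2]; exact hst'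
      · exact ihn ((i2, ch2) :: rest2) s0 T e N (by simp only [List.length_cons] at hlen ⊢; omega)
            (List.pairwise_cons.mp hpw).2
            (fun p hp => hN p (List.mem_cons_of_mem _ hp)) hs0
            (fun p hp => hall p (List.mem_cons_of_mem _ hp)) h

-- whitespace lemmas
theorem isspace_not_special : ∀ (c : Char), PySem.Chars.isspace c = true →
    ¬(c = '\'' ∨ c = '"') ∧ ¬(c = '(' ∨ c = '[') ∧ ¬(c = ')' ∨ c = ']') ∧ ¬(c = '?' ∨ c = ':') := by
  intro c h
  refine ⟨?_, ?_, ?_, ?_⟩ <;> rintro (rfl | rfl) <;> exact absurd h (by decide)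

theorem toks_lstrip : ∀ (l : List Char) quote esc depth i,
    pvToks l false quote esc depth i
      = pvToks (l.dropWhile PySem.Chars.isspace) false quote esc depth
          (i + (l.length - (l.dropWhile PySem.Chars.isspace).length)) := by
  intro l
  induction l with
  | nil => intros; simp [List.dropWhile]
  | cons ch rest ih =>
    intro quote esc depth i
    by_cases hsp : PySem.Chars.isspace ch = true
    · obtain ⟨hn1, hn2, hn3, hn4⟩ := isspace_not_special ch hsp
      have hstep : pvToks (ch :: rest) false quote esc depth i
          = pvToks rest false quote esc depth (i+1) := by
        rw [pvToks, if_neg (by simp : ¬(false = true)), if_neg hn1, if_neg hn2, if_neg hn3,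
            if_neg (fun hc => hn4 hc.2)]
      rw [hstep, List.dropWhile_cons, if_pos hsp, ih quote esc depth (i+1)]
      congr 1
      have hle : (rest.dropWhile PySem.Chars.isspace).length ≤ rest.length :=
        List.length_dropWhile_le _ _
      simp only [List.length_cons]
      omega
    · rw [List.dropWhile_cons, if_neg hsp]
      congr 1
      simp only [List.length_cons]
      omega

theorem strip_decomp : ∀ (x : List Char), ∃ wl wr,
    x = wl ++ PySem.Chars.lstrip x ∧
    PySem.Chars.lstrip x = PySem.Chars.strip x ++ wr ∧
    (∀ c ∈ wl, PySem.Chars.isspace c = true) ∧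
    (∀ c ∈ wr, PySem.Chars.isspace c = true) ∧
    wl.length = x.length - (x.dropWhile PySem.Chars.isspace).length := by
  intro x
  refine ⟨x.takeWhile PySem.Chars.isspace,
    ((PySem.Chars.lstrip x).reverse.takeWhile PySem.Chars.isspace).reverse, ?_, ?_, ?_, ?_, ?_⟩
  · rw [PySem.Chars.lstrip, List.takeWhile_append_dropWhile]
  · rw [PySem.Chars.strip, PySem.Chars.rstrip]
    conv_lhs => rw [← List.reverse_reverse (PySem.Chars.lstrip x),
      ← List.takeWhile_append_dropWhile (p := PySem.Chars.isspace)
        (l := (PySem.Chars.lstrip x).reverse)]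
    rw [List.reverse_append]
  · intro c hc; exact List.mem_takeWhile_imp hc
  · intro c hc
    rw [List.mem_reverse] at hc
    exact List.mem_takeWhile_imp hc
  · have h1 : (x.takeWhile PySem.Chars.isspace).length
        + (x.dropWhile PySem.Chars.isspace).length = x.length := by
      rw [← List.length_append, List.takeWhile_append_dropWhile]
    omega

theorem rstrip_ws : ∀ (u w : List Char), (∀ c ∈ w, PySem.Chars.isspace c = true) →
    PySem.Chars.rstrip (u ++ w) = PySem.Chars.rstrip u := by
  intro u w hw
  simp only [PySem.Chars.rstrip]
  rw [List.reverse_append, List.dropWhile_append]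
  rw [List.dropWhile_eq_nil_iff.mpr (fun c hc => hw c (List.mem_reverse.mp hc))]
  simp

theorem strip_ws_prefix : ∀ (w z : List Char), (∀ c ∈ w, PySem.Chars.isspace c = true) →
    PySem.Chars.strip (w ++ z) = PySem.Chars.strip z := by
  intro w z hw
  simp only [PySem.Chars.strip, PySem.Chars.lstrip]
  rw [List.dropWhile_append, List.dropWhile_eq_nil_iff.mpr hw]
  simp

theorem strip_ws_suffix : ∀ (z w : List Char), (∀ c ∈ w, PySem.Chars.isspace c = true) →
    PySem.Chars.strip (z ++ w) = PySem.Chars.strip z := by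
  intro z w hw
  simp only [PySem.Chars.strip, PySem.Chars.lstrip]
  rw [List.dropWhile_append]
  by_cases h0 : (z.dropWhile PySem.Chars.isspace).isEmpty = true
  · rw [if_pos h0, List.dropWhile_eq_nil_iff.mpr hw]
    rw [List.isEmpty_iff.mp h0]
  · rw [if_neg h0]
    exact rstrip_ws _ _ hw

-- tokens of the stripped list: same characters, positions shifted by the left-strip count
theorem toks_strip : ∀ (x : List Char),
    pvToks x false ' ' false 0 0
      = (pvToks (PySem.Chars.strip x) false ' ' false 0 0).map
          (fun p => (p.1 + (x.length - (x.dropWhile PySem.Chars.isspace).length), p.2)) := by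
  intro x
  obtain ⟨wl, wr, hx, hl, hwl, hwr, hlen⟩ := strip_decomp x
  set k := x.length - (x.dropWhile PySem.Chars.isspace).length with hk
  have h1 := toks_lstrip x ' ' false 0 0
  simp only [Nat.zero_add, ← hk] at h1
  rw [h1]
  have h2 : x.dropWhile PySem.Chars.isspace = PySem.Chars.lstrip x := rfl
  rw [h2, hl, toks_append_no_qc _ _ _ _ _ _ _
        (fun c hc => (isspace_not_special c (hwr c hc)).2.2.2)]
  rw [show k = 0 + k from by omega, toks_shift]
  simp

-- slice translations between the full string and the stripped tail
theorem drop_shift : ∀ (s wl y wr : List Char) (m : Nat), s.drop m = wl ++ (y ++ wr) →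
    ∀ a, a ≤ y.length → s.drop (a + (m + wl.length)) = y.drop a ++ wr := by
  intro s wl y wr m hs a ha
  have h1 : s.drop (a + (m + wl.length)) = (s.drop m).drop (wl.length + a) := by
    rw [List.drop_drop]
    congr 1
    omega
  rw [h1, hs, List.drop_append, List.drop_eq_nil_of_le (by omega : wl.length ≤ wl.length + a),
      List.nil_append, show wl.length + a - wl.length = a from by omega,
      List.drop_append_of_le_length ha]

theorem slice_shift : ∀ (s wl y wr : List Char) (m : Nat), s.drop m = wl ++ (y ++ wr) →
    ∀ a b, a ≤ y.length → b ≤ y.length →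
    (s.drop (a + (m + wl.length))).take (b - a) = (y.drop a).take (b - a) := by
  intro s wl y wr m hs a b ha hb
  rw [drop_shift s wl y wr m hs a ha,
      List.take_append_of_le_length (by rw [List.length_drop]; omega)]

theorem slice_head_shift : ∀ (s wl y wr : List Char) (m : Nat), s.drop m = wl ++ (y ++ wr) →
    (∀ c ∈ wl, PySem.Chars.isspace c = true) →
    ∀ q, q ≤ y.length →
    PySem.Chars.strip ((s.drop m).take (q + wl.length)) = PySem.Chars.strip (y.take q) := by
  intro s wl y wr m hs hwl q hq
  rw [hs, show q + wl.length = wl.length + q from by omega, List.take_append,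
      List.take_of_length_le (by omega : wl.length ≤ wl.length + q),
      show wl.length + q - wl.length = q from by omega,
      List.take_append_of_le_length hq]
  exact strip_ws_prefix wl _ hwl

theorem strip_drop_shift : ∀ (s wl y wr : List Char) (m : Nat), s.drop m = wl ++ (y ++ wr) →
    (∀ c ∈ wr, PySem.Chars.isspace c = true) →
    ∀ e, e ≤ y.length →
    PySem.Chars.strip (s.drop (e + (m + wl.length))) = PySem.Chars.strip (y.drop e) := by
  intro s wl y wr m hs hwr e he
  rw [drop_shift s wl y wr m hs e he]
  exact strip_ws_suffix _ wr hwr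

-- the fold over shifted triples equals the fold over the stripped tail
theorem foldr_build_shift : ∀ (s wl y wr : List Char) (m : Nat), s.drop m = wl ++ (y ++ wr) →
    ∀ (R : List (Nat × Nat × Nat)) (b : String),
    (∀ t ∈ R, t.1 ≤ t.2.1 ∧ t.2.1 + 1 ≤ t.2.2 ∧ t.2.2 < y.length) →
    (R.map (fun t => (t.1 + (m + wl.length), t.2.1 + (m + wl.length), t.2.2 + (m + wl.length)))).foldr
        (pvBuild s) b
      = R.foldr (pvBuild y) b := by
  intro s wl y wr m hs R
  induction R with
  | nil => intros; simp only [List.map_nil, List.foldr_nil]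
  | cons t R' ih =>
    intro b hb
    obtain ⟨a, q, c⟩ := t
    have hb0 := hb _ List.mem_cons_self
    have h1 : a ≤ q := hb0.1
    have h2 : q + 1 ≤ c := hb0.2.1
    have h3 : c < y.length := hb0.2.2
    simp only [List.map_cons, List.foldr_cons]
    rw [ih b (fun t ht => hb t (List.mem_cons_of_mem _ ht))]
    simp only [pvBuild]
    rw [show q + (m + wl.length) - (a + (m + wl.length)) = q - a from by omega]
    rw [show q + (m + wl.length) + 1 = (q + 1) + (m + wl.length) from by omega]
    rw [show c + (m + wl.length) - ((q + 1) + (m + wl.length)) = c - (q + 1) from by omega]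
    rw [slice_shift s wl y wr m hs (q+1) c (by omega) (by omega),
        slice_shift s wl y wr m hs a q (by omega) (by omega)]

-- evaluating B's port on an argument (definitional unfolding)
theorem alt_eval : ∀ (u : String),
    ternary_fix_py_alt u
      = (match pvPairs (pvToks u.toList false ' ' false 0 0) 0 with
         | none => ""
         | some (triples, start) =>
           match triples with
           | [] => u
           | _ :: _ => triples.foldr (pvBuild u.toList)
               (PySem.Str.strip (String.ofList (u.toList.drop start)))) := by
  intro u
  simp only [ternary_fix_py_alt]

-- B on the stripped tail computes the tail of the fold
theorem alt_tail : ∀ (s : List Char) (m : Nat) T st,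
    pvPairs (pvToks (s.drop m) false ' ' false 0 m) m = some (T, st) →
    ternary_fix_py_alt (PySem.Str.strip (String.ofList (s.drop m)))
      = T.foldr (pvBuild s) (PySem.Str.strip (String.ofList (s.drop st))) := by
  intro s m T st h
  obtain ⟨wl, wr, hx, hl, hwl, hwr, hlen⟩ := strip_decomp (s.drop m)
  have hs : s.drop m = wl ++ (PySem.Chars.strip (s.drop m) ++ wr) := by
    conv_lhs => rw [hx, hl]
  set x := s.drop m with hxdef
  set y := PySem.Chars.strip x with hydef
  set d := m + wl.length with hddef
  have hu : (PySem.Str.strip (String.ofList x)).toList = y := by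
    simp only [PySem.Str.toList_strip, String.toList_ofList]
    exact hydef.symm
  have htoks : pvToks x false ' ' false 0 m
      = (pvToks y false ' ' false 0 0).map (fun p => (p.1 + d, p.2)) := by
    rw [show m = 0 + m from by omega, toks_shift, toks_strip x, ← hlen, List.map_map]
    apply List.map_congr_left
    intro p _
    simp only [Function.comp_apply, Prod.mk.injEq]
    refine ⟨by omega, trivial⟩
  rw [htoks] at h
  rw [pvPairs_start _ m (0 + d), pvPairs_shift] at h
  rcases hy : pvPairs (pvToks y false ' ' false 0 0) 0 with _ | ⟨Ty, ey⟩
  · rw [hy] at h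
    simp at h
  · rw [hy] at h
    simp only [Option.map_some, Option.some.injEq, Prod.mk.injEq] at h
    have hbounds := pvPairs_bounds (pvToks y false ' ' false 0 0) 0 Ty ey y.length
      (toks_sorted _ _ _ _ _ _)
      (fun p hp => by have := (toks_bound _ _ _ _ _ _ _ hp).2; omega)
      (Nat.zero_le _) (fun p _ => Nat.zero_le _) hy
    cases Ty with
    | nil =>
      simp only [List.map_nil] at h
      obtain ⟨hT, hst⟩ := h
      rw [← hT, ← hst]
      have hey : ey = 0 := pvPairs_empty_start _ 0 ey hy
      rw [alt_eval, hu, hy, hey]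
      rfl
    | cons ty Ry =>
      obtain ⟨a0, q0, c0⟩ := ty
      simp only [List.map_cons] at h
      obtain ⟨hT, hst⟩ := h
      have ha0 : a0 = 0 := pvPairs_head_start _ 0 _ _ _ hy
      have hb0 := hbounds.1 _ List.mem_cons_self
      have hb1 : a0 ≤ q0 := hb0.1
      have hb2 : q0 + 1 ≤ c0 := hb0.2.1
      have hb3 : c0 < y.length := hb0.2.2
      have hRb : ∀ t ∈ Ry, t.1 ≤ t.2.1 ∧ t.2.1 + 1 ≤ t.2.2 ∧ t.2.2 < y.length :=
        fun t ht => hbounds.1 t (List.mem_cons_of_mem _ ht)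
      have hey : ey ≤ y.length := hbounds.2
      have halt : ternary_fix_py_alt (PySem.Str.strip (String.ofList x))
          = ((a0, q0, c0) :: Ry).foldr (pvBuild y)
              (PySem.Str.strip (String.ofList (y.drop ey))) := by
        rw [alt_eval, hu, hy]
      rw [halt, ← hT, ← hst]
      simp only [List.foldr_cons]
      have hbase : PySem.Str.strip (String.ofList (s.drop (ey + d)))
          = PySem.Str.strip (String.ofList (y.drop ey)) := by
        simp only [PySem.Str.strip, String.toList_ofList]
        rw [strip_drop_shift s wl y wr m hs hwr ey hey]
      rw [hbase, foldr_build_shift s wl y wr m hs Ry _ hRb]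
      simp only [pvBuild]
      rw [show q0 + d + 1 = (q0 + 1) + (m + wl.length) from by omega]
      rw [show c0 + d - ((q0 + 1) + (m + wl.length)) = c0 - (q0 + 1) from by omega]
      rw [slice_shift s wl y wr m hs (q0+1) c0 (by omega) (by omega)]
      have hcond : PySem.Str.strip (String.ofList ((s.drop m).take (q0 + d - m)))
          = PySem.Str.strip (String.ofList ((y.drop a0).take (q0 - a0))) := by
        simp only [PySem.Str.strip, String.toList_ofList]
        rw [ha0, List.drop_zero, Nat.sub_zero,
            show q0 + d - m = q0 + wl.length from by omega,
            slice_head_shift s wl y wr m hs hwl q0 (by omega)]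
      rw [hcond]
-- A returns its argument when the argument has no top-level '?' token
theorem tfA_no_q : ∀ (u : String),
    (∀ p ∈ pvToks u.toList false ' ' false 0 0, p.2 ≠ '?') → ternary_fix_py u = u := by
  intro u h
  have hfq : pvFindQ u.toList false ' ' false 0 0 = none := by
    rw [tokQ, List.find?_eq_none.mpr (fun p hp => by simpa using h p hp)]
    rfl
  rw [ternary_fix_py.eq_def]
  by_cases h0 : PySem.Str.isIn "?" u = false
  · simp only [h0]
    rfl
  · simp only [h0]
    cases hq : pvFindQ u.toList false ' ' false 0 0 with
    | none => rfl
    | some q => rw [hfq] at hq; simp at hq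

-- B returns its argument when all top-level tokens are ':'
theorem alt_no_q : ∀ (u : String),
    (∀ p ∈ pvToks u.toList false ' ' false 0 0, p.2 = ':') → ternary_fix_py_alt u = u := by
  intro u hcol
  have hpp : pvPairs (pvToks u.toList false ' ' false 0 0) 0 = some ([], 0) := by
    have h1 := pvPairs_skip (pvToks u.toList false ' ' false 0 0) [] 0 hcol
    rw [List.append_nil] at h1
    rw [h1, pvPairs_nil]
  rw [alt_eval, hpp]

-- absence of the character '?' forbids '?' tokens
theorem no_q_of_not_in : ∀ (u : String), PySem.Str.isIn "?" u = false →
    ∀ p ∈ pvToks u.toList false ' ' false 0 0, p.2 ≠ '?' := by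
  intro u h0 p hp hq
  have hmem := toks_mem _ _ _ _ _ _ _ hp
  rw [hq] at hmem
  have hin : PySem.Str.isIn "?" u = true := by
    rw [PySem.Str.isIn_iff_infix]
    obtain ⟨l1, l2, hsplit⟩ := List.append_of_mem hmem
    exact ⟨l1, l2, by rw [hsplit]; simp⟩
  rw [h0] at hin
  exact Bool.noConfusion hin

-- evaluating A's port when the two scans succeed
theorem tfA_eval : ∀ (u : String) (q c0 : Nat),
    ¬ PySem.Str.isIn "?" u = false →
    pvFindQ u.toList false ' ' false 0 0 = some q →
    pvFindC (u.toList.drop (q+1)) false ' ' false 0 (q+1) = some c0 →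
    ternary_fix_py u
      = "(" ++ ternary_fix_py (PySem.Str.strip (String.ofList ((u.toList.drop (q+1)).take (c0 - (q+1)))))
        ++ " if " ++ ternary_fix_py (PySem.Str.strip (String.ofList (u.toList.take q)))
        ++ " else " ++ ternary_fix_py (PySem.Str.strip (String.ofList (u.toList.drop (c0+1)))) ++ ")" := by
  intro u q c0 h0 hq hfc
  rw [ternary_fix_py.eq_def]
  simp only [h0, if_false]
  cases hq2 : pvFindQ u.toList false ' ' false 0 0 with
  | none => rw [hq] at hq2; simp at hq2
  | some q' =>
    rw [hq] at hq2
    injection hq2 with hq2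
    subst hq2
    show (match pvFindC (List.drop (q + 1) u.toList) false ' ' false 0 (q + 1) with
      | none => ""
      | some cpos =>
        "(" ++ ternary_fix_py (PySem.Str.strip (String.ofList
              (List.take (cpos - (q + 1)) (List.drop (q + 1) u.toList))))
          ++ " if " ++ ternary_fix_py (PySem.Str.strip (String.ofList (List.take q u.toList)))
          ++ " else " ++ ternary_fix_py (PySem.Str.strip (String.ofList
              (List.drop (cpos + 1) u.toList))) ++ ")") = _
    rw [hfc]

theorem tf_eq : ∀ (segment : String), Pre_ternary_fix_py segment →
    ternary_fix_py segment = ternary_fix_py_alt segment := by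
  suffices H : ∀ (n : Nat) (segment : String), segment.toList.length = n →
      Pre_ternary_fix_py segment →
      ternary_fix_py segment = ternary_fix_py_alt segment by
    exact fun segment hpre => H segment.toList.length segment rfl hpre
  intro n
  induction n using Nat.strong_induction_on with
  | _ n ih =>
  intro segment hn hpre
  by_cases h0 : PySem.Str.isIn "?" segment = false
  · have hno := no_q_of_not_in segment h0
    rw [tfA_no_q segment hno,
        alt_no_q segment (fun p hp => (toks_chars _ _ _ _ _ _ _ hp).resolve_left (hno p hp))]
  · cases hq : pvFindQ segment.toList false ' ' false 0 0 with
    | none =>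
      have hfind : (pvToks segment.toList false ' ' false 0 0).find? (fun p => p.2 == '?') = none := by
        rw [tokQ] at hq
        cases hfe : (pvToks segment.toList false ' ' false 0 0).find? (fun p => p.2 == '?') with
        | none => rfl
        | some p => rw [hfe] at hq; simp at hq
      have hno : ∀ p ∈ pvToks segment.toList false ' ' false 0 0, p.2 ≠ '?' := by
        intro p hp
        have := List.find?_eq_none.mp hfind p hp
        simpa using this
      rw [tfA_no_q segment hno,
          alt_no_q segment (fun p hp => (toks_chars _ _ _ _ _ _ _ hp).resolve_left (hno p hp))]
    | some q =>
      obtain ⟨hsplit, hPne⟩ := splitQ segment.toList false ' ' false 0 0 q (fun _ => rfl) hq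
      simp only [Nat.sub_zero] at hsplit hPne
      have hPc : ∀ p ∈ pvToks (segment.toList.take q) false ' ' false 0 0, p.2 = ':' :=
        fun p hp => (toks_chars _ _ _ _ _ _ _ hp).resolve_left (hPne p hp)
      have hok : pvPairOK ((pvToks segment.toList false ' ' false 0 0).map Prod.snd) false = true := by
        have h1 := hpre
        unfold Pre_ternary_fix_py at h1
        rw [preToks segment.toList false ' ' false 0 0 false] at h1
        exact h1
      rw [hsplit, List.map_append,
          pairOK_colons _ _ (fun c hc => by
            obtain ⟨p, hp, hpc⟩ := List.mem_map.mp hc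
            rw [← hpc]; exact hPc p hp)] at hok
      simp only [List.map_cons] at hok
      have hok2 : pvPairOK ((pvToks (segment.toList.drop (q+1)) false ' ' false 0 (q+1)).map Prod.snd) true = true := by
        simpa [pvPairOK] using hok
      cases hSf : pvToks (segment.toList.drop (q+1)) false ' ' false 0 (q+1) with
      | nil => rw [hSf] at hok2; simp [pvPairOK] at hok2
      | cons p0 S2 =>
        obtain ⟨c0, ch0⟩ := p0
        have hch0 : ch0 = ':' := by
          rcases toks_chars _ _ _ _ _ _ _
              (show (c0, ch0) ∈ pvToks (segment.toList.drop (q+1)) false ' ' false 0 (q+1) from by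
                rw [hSf]; exact List.mem_cons_self) with h | h
          · exfalso
            have h' : ch0 = '?' := h
            rw [hSf, h'] at hok2
            simp [pvPairOK] at hok2
          · exact h
        subst hch0
        have hfc : pvFindC (segment.toList.drop (q+1)) false ' ' false 0 (q+1) = some c0 := by
          rw [tokC, hSf]
          simp
        have hq1 : q < segment.toList.length := by
          have := (pvFindQ_bounds _ _ _ _ _ _ _ hq).2
          simpa using this
        have hc0 : q + 1 ≤ c0 ∧ c0 < segment.toList.length := by
          have hmem : (c0, ':') ∈ pvToks (segment.toList.drop (q+1)) false ' ' false 0 (q+1) := by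
            rw [hSf]; exact List.mem_cons_self
          have hb := toks_bound _ _ _ _ _ _ _ hmem
          have hlen : (segment.toList.drop (q+1)).length = segment.toList.length - (q+1) :=
            List.length_drop
          exact ⟨hb.1, by omega⟩
        obtain ⟨hsplit2, hPne2⟩ := splitC (segment.toList.drop (q+1)) false ' ' false 0 (q+1) c0
          (fun _ => rfl) hfc
        have hP' : pvToks ((segment.toList.drop (q+1)).take (c0-(q+1))) false ' ' false 0 (q+1) = [] := by
          cases hP'c : pvToks ((segment.toList.drop (q+1)).take (c0-(q+1))) false ' ' false 0 (q+1) with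
          | nil => rfl
          | cons pp PP =>
            exfalso
            rw [hSf, hP'c, List.cons_append] at hsplit2
            have hpp : pp = (c0, ':') := ((List.cons.injEq _ _ _ _).mp hsplit2).1.symm
            exact hPne2 pp (by rw [hP'c]; exact List.mem_cons_self) (by rw [hpp])
        have hS2 : S2 = pvToks (segment.toList.drop (c0+1)) false ' ' false 0 (c0+1) := by
          have h1 := hsplit2
          rw [hSf, hP', List.nil_append] at h1
          have h2 := ((List.cons.injEq _ _ _ _).mp h1).2
          rw [h2, List.drop_drop, show q+1 + (c0+1-(q+1)) = c0+1 from by omega]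
        have hok3 : pvPairOK (S2.map Prod.snd) false = true := by
          rw [hSf] at hok2
          simpa [pvPairOK] using hok2
        obtain ⟨T2, st2, hT2⟩ := pvPairs_total S2 (c0+1)
          (fun p hp => toks_chars _ _ _ _ _ _ _ (show p ∈ _ from hS2 ▸ hp)) hok3
        have hppseg : pvPairs (pvToks segment.toList false ' ' false 0 0) 0
            = some ((0, q, c0) :: T2, st2) := by
          rw [hsplit, pvPairs_skip _ _ 0 hPc, hSf, pvPairs_cons2, if_pos rfl, if_pos rfl, hT2]
          rfl
        have hcond : ternary_fix_py (PySem.Str.strip (String.ofList (segment.toList.take q)))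
            = PySem.Str.strip (String.ofList (segment.toList.take q)) := by
          apply tfA_no_q
          intro p hp
          rw [PySem.Str.toList_strip, String.toList_ofList] at hp
          have h1 := toks_strip (segment.toList.take q)
          have hmem : ((p.1 + ((segment.toList.take q).length
                - ((segment.toList.take q).dropWhile PySem.Chars.isspace).length), p.2))
              ∈ pvToks (segment.toList.take q) false ' ' false 0 0 := by
            rw [h1]
            exact List.mem_map.mpr ⟨p, hp, rfl⟩
          exact hPne (p.1 + ((segment.toList.take q).length
              - ((segment.toList.take q).dropWhile PySem.Chars.isspace).length), p.2) hmem
        have hmid : ternary_fix_py (PySem.Str.strip (String.ofList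
              ((segment.toList.drop (q+1)).take (c0 - (q+1)))))
            = PySem.Str.strip (String.ofList ((segment.toList.drop (q+1)).take (c0 - (q+1)))) := by
          apply tfA_no_q
          intro p hp
          rw [PySem.Str.toList_strip, String.toList_ofList] at hp
          have h2 : pvToks ((segment.toList.drop (q+1)).take (c0-(q+1))) false ' ' false 0 0 = [] := by
            have h3 := toks_shift ((segment.toList.drop (q+1)).take (c0-(q+1))) false ' ' false 0 0 (q+1)
            rw [show (0:Nat) + (q+1) = q+1 from by omega, hP'] at h3
            exact List.map_eq_nil_iff.mp h3.symm
          have h1 := toks_strip ((segment.toList.drop (q+1)).take (c0-(q+1)))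
          rw [h2] at h1
          rw [List.map_eq_nil_iff.mp h1.symm] at hp
          exact absurd hp (List.not_mem_nil)
        have hsndeq : ∀ (z : List Char) (i : Nat),
            (pvToks z false ' ' false 0 i).map Prod.snd
              = (pvToks (PySem.Chars.strip z) false ' ' false 0 0).map Prod.snd := by
          intro z i
          have h2 := toks_shift z false ' ' false 0 0 i
          rw [show (0:Nat) + i = i from by omega] at h2
          rw [h2, toks_strip z, List.map_map, List.map_map]
          rfl
        have hpreb : Pre_ternary_fix_py (PySem.Str.strip (String.ofList (segment.toList.drop (c0+1)))) := by
          unfold Pre_ternary_fix_py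
          rw [preToks _ false ' ' false 0 0 false, PySem.Str.toList_strip, String.toList_ofList]
          rw [← hsndeq (segment.toList.drop (c0+1)) (c0+1), ← hS2]
          exact hok3
        have hlt : (PySem.Str.strip (String.ofList (segment.toList.drop (c0+1)))).toList.length < n := by
          rw [PySem.Str.toList_strip, String.toList_ofList]
          refine lt_of_le_of_lt (length_strip_le _) ?_
          rw [List.length_drop]
          omega
        have hb := ih _ hlt (PySem.Str.strip (String.ofList (segment.toList.drop (c0+1)))) rfl hpreb
        have htail := alt_tail segment.toList (c0+1) T2 st2 (by rw [← hS2]; exact hT2)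
        rw [tfA_eval segment q c0 h0 hq hfc, hcond, hmid, hb, htail, alt_eval, hppseg]
        rfl
-- ===== VERDICT (by name: the statement is the Claim_ definition above) =====
theorem ternary_fix_py_spec : Claim_equal_ternary_fix_py := by
  intro segment _ hpre
  unfold Spec_ternary_fix_py
  exact tf_eq segment hpre
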